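-- pv_equiv track=rewrite | github.com/sylvanus4/github-to-notion-sync | .cursor/skills/pipeline/x-to-notion/scripts/parse_article.py | _render_styled_segment
-- ===== SOURCE A (Python) =====
-- def _render_styled_segment(text: str, bold_flags: list, italic_flags: list) -> str:
--     result = []
--     n = len(text)
--     i = 0
--     while i < n:
--         b, it = bold_flags[i], italic_flags[i]
--         j = i
--         while j < n and bold_flags[j] == b and italic_flags[j] == it:
--             j += 1
--         seg = text[i:j]
--         if b and it:
--             result.append(f"***{seg}***")
--         elif b:
--             result.append(f"**{seg}**")
--         elif it:
--             result.append(f"*{seg}*")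
--         else:
--             result.append(seg)
--         i = j
--     return "".join(result)
-- ===== SOURCE B (Python) =====
-- def _wrap(seg, b, it):
--     if b and it:
--         return f"***{seg}***"
--     if b:
--         return f"**{seg}**"
--     if it:
--         return f"*{seg}*"
--     return seg
--
--
-- def _render_styled_segment(text: str, bold_flags: list, italic_flags: list) -> str:
--     parts = []
--     buf = []
--     cur = None
--     for i, ch in enumerate(text):
--         style = (bold_flags[i], italic_flags[i])
--         if style != cur:
--             if buf:
--                 parts.append(_wrap("".join(buf), *cur))
--             buf = [ch]
--             cur = style
--         else:
--             buf.append(ch)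
--     if buf:
--         parts.append(_wrap("".join(buf), *cur))
--     return "".join(parts)
-- ===== Notes on version B (the rewrite author's own statement) =====
-- stated objective: simpler
-- what changed: Replaced the nested while-loops (inner index scan to find each run's end, then slicing) by a single forward pass that carries a run buffer and the current style, flushing the buffer whenever the style changes.
import Mathlib
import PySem

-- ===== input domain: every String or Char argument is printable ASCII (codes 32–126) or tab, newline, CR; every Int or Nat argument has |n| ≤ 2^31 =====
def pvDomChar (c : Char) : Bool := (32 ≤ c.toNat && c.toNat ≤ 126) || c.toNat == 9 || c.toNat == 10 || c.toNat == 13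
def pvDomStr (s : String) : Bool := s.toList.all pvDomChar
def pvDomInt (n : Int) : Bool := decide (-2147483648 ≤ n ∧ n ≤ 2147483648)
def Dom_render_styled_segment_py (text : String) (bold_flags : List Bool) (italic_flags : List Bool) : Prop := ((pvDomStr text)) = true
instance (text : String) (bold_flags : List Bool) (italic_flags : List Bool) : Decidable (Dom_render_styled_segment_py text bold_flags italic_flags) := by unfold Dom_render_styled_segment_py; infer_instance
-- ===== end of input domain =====

-- B replaces A's nested while-loops (inner scan for each run's end, then slicing) by a
-- single pass carrying a run buffer and the current style, flushed on style change. (objective: simpler)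

-- ===== PORT A =====
-- the four-way if/elif wrapping inside A's loop body (over List Char)
def pvWrapA (b it : Bool) (seg : List Char) : List Char :=
  if b && it then "***".toList ++ seg ++ "***".toList
  else if b then "**".toList ++ seg ++ "**".toList
  else if it then "*".toList ++ seg ++ "*".toList
  else seg

-- inner while loop of A: advance j while flags match (b, it); returns the final j
def pvAInner (bf itf : List Bool) (n : Nat) (b it : Bool) (j : Nat) : Nat :=
  if _h : j < n then
    if bf.getD j false == b && itf.getD j false == it then pvAInner bf itf n b it (j + 1)
    else j
  else j
termination_by n - j

theorem pvAInner_ge (bf itf : List Bool) (n : Nat) (b it : Bool) (j : Nat) :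
    j ≤ pvAInner bf itf n b it j := by
  unfold pvAInner
  split
  · split
    · exact Nat.le_trans (Nat.le_succ j) (pvAInner_ge bf itf n b it (j + 1))
    · exact Nat.le_refl j
  · exact Nat.le_refl j
termination_by n - j

theorem pvAInner_gt (bf itf : List Bool) (n : Nat) (b it : Bool) (j : Nat)
    (hj : j < n) (hb : bf.getD j false = b) (hi : itf.getD j false = it) :
    j < pvAInner bf itf n b it j := by
  unfold pvAInner
  rw [dif_pos hj, hb, hi]
  simp only [BEq.rfl, Bool.and_self, if_pos rfl]
  exact Nat.lt_of_lt_of_le (Nat.lt_succ_self j) (pvAInner_ge bf itf n b it (j + 1))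

-- outer while loop of A: result accumulates the wrapped segments
def pvALoop (cs : List Char) (bf itf : List Bool) (n i : Nat) (result : List (List Char)) :
    List (List Char) :=
  if h : i < n then
    -- b, it, j, seg of A's body are inlined (same values, written in place)
    pvALoop cs bf itf n (pvAInner bf itf n (bf.getD i false) (itf.getD i false) i)
      (result ++ [pvWrapA (bf.getD i false) (itf.getD i false)
        ((cs.drop i).take (pvAInner bf itf n (bf.getD i false) (itf.getD i false) i - i))])
  else result
termination_by n - i
decreasing_by
  have := pvAInner_gt bf itf n (bf.getD i false) (itf.getD i false) i h rfl rfl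
  omega

def render_styled_segment_py (text : String) (bold_flags : List Bool) (italic_flags : List Bool) : String :=
  let cs := text.toList
  String.mk (pvALoop cs bold_flags italic_flags cs.length 0 []).flatten

-- ===== PORT B =====
-- B's _wrap helper
def pvWrap (b it : Bool) (seg : List Char) : List Char :=
  if b && it then "***".toList ++ seg ++ "***".toList
  else if b then "**".toList ++ seg ++ "**".toList
  else if it then "*".toList ++ seg ++ "*".toList
  else seg

-- one step of B's for-loop: state = (parts-so-far flattened, run buffer, current style)
def pvBStep (bf itf : List Bool) (st : List Char × List Char × Option (Bool × Bool))
    (p : Nat × Char) : List Char × List Char × Option (Bool × Bool) :=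
  -- style of B's body is inlined: (bf.getD p.1 false, itf.getD p.1 false)
  match st with
  | (parts, buf, cur) =>
    if cur == some ((bf.getD p.1 false, itf.getD p.1 false) : Bool × Bool) then
      (parts, buf ++ [p.2], cur)
    else
      match cur with
      | some k => (parts ++ (if buf.isEmpty then [] else pvWrap k.1 k.2 buf), [p.2],
          some (bf.getD p.1 false, itf.getD p.1 false))
      | none => (parts, [p.2], some (bf.getD p.1 false, itf.getD p.1 false))

-- final flush after the loop ('if buf: …')
def pvBFinal (st : List Char × List Char × Option (Bool × Bool)) : List Char :=
  match st with
  | (parts, buf, cur) =>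
    if buf.isEmpty then parts
    else match cur with
      | some k => parts ++ pvWrap k.1 k.2 buf
      | none => parts

def render_styled_segment_py_alt (text : String) (bold_flags : List Bool) (italic_flags : List Bool) : String :=
  let cs := text.toList
  String.mk (pvBFinal (((List.range cs.length).zip cs).foldl (pvBStep bold_flags italic_flags) ([], [], none)))

-- ===== PRECONDITION & SPEC =====
-- Pre_: the flag lists cover every character position; on shorter flag lists the Python A
-- raises IndexError (bold_flags[i] / italic_flags[i] out of range).
def Pre_render_styled_segment_py (text : String) (bold_flags : List Bool) (italic_flags : List Bool) : Prop :=
  text.toList.length ≤ bold_flags.length ∧ text.toList.length ≤ italic_flags.length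
instance (text : String) (bold_flags : List Bool) (italic_flags : List Bool) : Decidable (Pre_render_styled_segment_py text bold_flags italic_flags) := by unfold Pre_render_styled_segment_py; infer_instance

def pvWitness_render_styled_segment_py : String × List Bool × List Bool :=
  ("abc", [true, true, false], [false, false, false])

def Spec_render_styled_segment_py (text : String) (bold_flags : List Bool) (italic_flags : List Bool) (out : String) : Prop := out = render_styled_segment_py_alt text bold_flags italic_flags
instance (text : String) (bold_flags : List Bool) (italic_flags : List Bool) (out : String) : Decidable (Spec_render_styled_segment_py text bold_flags italic_flags out) := by unfold Spec_render_styled_segment_py; infer_instance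

-- ===== CLAIM (what is proved, stated in full; the proofs are below) =====
def Claim_equal_render_styled_segment_py : Prop := ∀ (text : String) (bold_flags : List Bool) (italic_flags : List Bool), Dom_render_styled_segment_py text bold_flags italic_flags → Pre_render_styled_segment_py text bold_flags italic_flags → Spec_render_styled_segment_py text bold_flags italic_flags (render_styled_segment_py text bold_flags italic_flags)

-- ===== LEMMAS AND PROOFS =====

-- the canonical run decomposition both loops compute: group consecutive equal styles
def pvTriples (cs : List Char) (bf itf : List Bool) : List (Char × Bool × Bool) :=
  (List.range cs.length).map (fun i => (cs.getD i ' ', bf.getD i false, itf.getD i false))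

def pvKey (b it : Bool) (x : Char × Bool × Bool) : Bool := x.2.1 == b && x.2.2 == it

def pvRender : List (Char × Bool × Bool) → List Char
  | [] => []
  | (c, b, it) :: rest =>
      pvWrap b it (c :: (rest.takeWhile (pvKey b it)).map (·.1)) ++
        pvRender (rest.dropWhile (pvKey b it))
termination_by l => l.length
decreasing_by
  simp only [List.length_cons]
  exact Nat.lt_succ_of_le (List.length_dropWhile_le _ _)

theorem pvTriples_length (cs : List Char) (bf itf : List Bool) :
    (pvTriples cs bf itf).length = cs.length := by
  simp [pvTriples]

theorem pvTriples_getElem (cs : List Char) (bf itf : List Bool) (j : Nat) (h : j < cs.length) :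
    (pvTriples cs bf itf)[j]'(by simpa [pvTriples_length] using h) =
      (cs.getD j ' ', bf.getD j false, itf.getD j false) := by
  simp [pvTriples]

theorem pvTriples_drop_cons (cs : List Char) (bf itf : List Bool) (j : Nat) (h : j < cs.length) :
    (pvTriples cs bf itf).drop j =
      (cs.getD j ' ', bf.getD j false, itf.getD j false) :: (pvTriples cs bf itf).drop (j + 1) := by
  rw [List.drop_eq_getElem_cons (by simpa [pvTriples_length] using h)]
  rw [pvTriples_getElem cs bf itf j h]

theorem pvTriples_map_fst (cs : List Char) (bf itf : List Bool) :
    (pvTriples cs bf itf).map (·.1) = cs := by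
  apply List.ext_getElem
  · simp [pvTriples]
  · intro n h1 h2
    simp [pvTriples, List.getElem?_eq_getElem h2]

theorem pv_takeWhile_len_le {α : Type} (p : α → Bool) (xs : List α) :
    (xs.takeWhile p).length ≤ xs.length := by
  induction xs with
  | nil => simp
  | cons x xs ih =>
    by_cases h : p x = true
    · simp [List.takeWhile_cons, h]; omega
    · simp [List.takeWhile_cons, h]

theorem pv_take_takeWhile {α : Type} (p : α → Bool) (xs : List α) :
    xs.take (xs.takeWhile p).length = xs.takeWhile p := by
  induction xs with
  | nil => rfl
  | cons x xs ih =>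
    by_cases h : p x = true
    · simp [List.takeWhile_cons, h, ih]
    · simp [List.takeWhile_cons, h]

theorem pv_drop_dropWhile {α : Type} (p : α → Bool) (xs : List α) :
    xs.drop (xs.takeWhile p).length = xs.dropWhile p := by
  induction xs with
  | nil => rfl
  | cons x xs ih =>
    by_cases h : p x = true
    · simp [List.takeWhile_cons, List.dropWhile_cons, h, ih]
    · simp [List.takeWhile_cons, List.dropWhile_cons, h]

-- A's inner scan counts exactly the matching prefix of the triples suffix
theorem pvAInner_eq (cs : List Char) (bf itf : List Bool) (b it : Bool) (j : Nat)
    (hj : j ≤ cs.length) :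
    pvAInner bf itf cs.length b it j =
      j + (((pvTriples cs bf itf).drop j).takeWhile (pvKey b it)).length := by
  unfold pvAInner
  by_cases h : j < cs.length
  · rw [dif_pos h, pvTriples_drop_cons cs bf itf j h]
    by_cases hc : (bf.getD j false == b && itf.getD j false == it) = true
    · rw [if_pos hc, pvAInner_eq cs bf itf b it (j + 1) h]
      have hk : pvKey b it (cs.getD j ' ', bf.getD j false, itf.getD j false) = true := hc
      rw [List.takeWhile_cons, if_pos hk]
      simp only [List.length_cons]
      omega
    · rw [if_neg hc]
      have hk : pvKey b it (cs.getD j ' ', bf.getD j false, itf.getD j false) = false := by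
        simpa [pvKey] using hc
      rw [List.takeWhile_cons, if_neg (by simp only [hk]; simp)]
      simp
  · rw [dif_neg h]
    have : j = cs.length := by omega
    subst this
    simp [List.drop_eq_nil_of_le (le_of_eq (pvTriples_length cs bf itf))]
termination_by cs.length - j

-- A's outer loop produces the canonical run rendering
theorem pvALoop_eq (cs : List Char) (bf itf : List Bool) (i : Nat) (hi : i ≤ cs.length)
    (result : List (List Char)) :
    (pvALoop cs bf itf cs.length i result).flatten =
      result.flatten ++ pvRender ((pvTriples cs bf itf).drop i) := by
  unfold pvALoop
  by_cases h : i < cs.length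
  · rw [dif_pos h]
    set b := bf.getD i false with hb
    set it := itf.getD i false with hit
    set t := pvTriples cs bf itf with ht
    set w := ((t.drop (i + 1)).takeWhile (pvKey b it)).length with hw
    have hinner : pvAInner bf itf cs.length b it i = i + 1 + w := by
      rw [pvAInner_eq cs bf itf b it i (le_of_lt h)]
      rw [pvTriples_drop_cons cs bf itf i h]
      rw [List.takeWhile_cons, if_pos (by simp [pvKey, hb, hit])]
      simp only [List.length_cons, ← ht, ← hw]
      omega
    have hwle : i + 1 + w ≤ cs.length := by
      have h1 : (t.drop (i + 1)).length = cs.length - (i + 1) := by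
        simp [ht, pvTriples_length]
      have h2 : w ≤ (t.drop (i + 1)).length := by
        rw [hw]; exact pv_takeWhile_len_le _ _
      omega
    have hdc : t.drop i = (cs.getD i ' ', b, it) :: t.drop (i + 1) := by
      rw [ht, hb, hit]; exact pvTriples_drop_cons cs bf itf i h
    have htw : (t.drop (i + 1)).take w = (t.drop (i + 1)).takeWhile (pvKey b it) := by
      rw [hw]; exact pv_take_takeWhile _ _
    have hseg : (cs.drop i).take (i + 1 + w - i) =
        cs.getD i ' ' :: ((t.drop (i + 1)).takeWhile (pvKey b it)).map (·.1) := by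
      have h1 : cs.drop i = (t.drop i).map (·.1) := by
        rw [ht, List.map_drop, pvTriples_map_fst]
      rw [h1, show i + 1 + w - i = w + 1 by omega, hdc, List.map_cons, List.take_succ_cons,
        ← List.map_take, htw]
    have hdrop : t.drop (i + 1 + w) = (t.drop (i + 1)).dropWhile (pvKey b it) := by
      rw [show i + 1 + w = (i + 1) + w by omega, ← List.drop_drop, hw]
      exact pv_drop_dropWhile _ _
    rw [hinner, pvALoop_eq cs bf itf (i + 1 + w) hwle, List.flatten_append,
      show pvWrapA = pvWrap from rfl]
    simp only [List.flatten_cons, List.flatten_nil, List.append_nil, List.append_assoc]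
    congr 1
    rw [hdc, pvRender, hseg, hdrop]
  · rw [dif_neg h]
    have : i = cs.length := by omega
    subst this
    rw [List.drop_eq_nil_of_le (le_of_eq (pvTriples_length cs bf itf))]
    simp [pvRender]
termination_by cs.length - i
decreasing_by omega

-- B's fold over the enumerated suffix, from an active run state, finishes the current run
-- and then renders the remaining triples
theorem pvBFold_eq (cs : List Char) (bf itf : List Bool) (j : Nat) (hj : j ≤ cs.length)
    (parts buf : List Char) (hbuf : buf ≠ []) (k : Bool × Bool) :
    pvBFinal ((((List.range cs.length).zip cs).drop j).foldl (pvBStep bf itf) (parts, buf, some k)) =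
      parts ++ pvWrap k.1 k.2 (buf ++ (((pvTriples cs bf itf).drop j).takeWhile (pvKey k.1 k.2)).map (·.1)) ++
        pvRender (((pvTriples cs bf itf).drop j).dropWhile (pvKey k.1 k.2)) := by
  by_cases h : j < cs.length
  · have hcons : ((List.range cs.length).zip cs).drop j =
        (j, cs[j]) :: ((List.range cs.length).zip cs).drop (j + 1) := by
      rw [List.drop_eq_getElem_cons (by simpa using h)]
      congr 1
      simp
    have hdc : (pvTriples cs bf itf).drop j =
        (cs.getD j ' ', bf.getD j false, itf.getD j false) :: (pvTriples cs bf itf).drop (j + 1) :=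
      pvTriples_drop_cons cs bf itf j h
    have hc : cs.getD j ' ' = cs[j] := List.getD_eq_getElem cs ' ' h
    rw [hcons, List.foldl_cons]
    by_cases hk : (bf.getD j false, itf.getD j false) = k
    · -- same style: extend the buffer
      subst hk
      have hstep : pvBStep bf itf
          (parts, buf, some (bf.getD j false, itf.getD j false)) (j, cs[j]) =
          (parts, buf ++ [cs[j]], some (bf.getD j false, itf.getD j false)) := by
        simp [pvBStep]
      have hkey : pvKey (bf.getD j false, itf.getD j false).1 (bf.getD j false, itf.getD j false).2
          (cs.getD j ' ', bf.getD j false, itf.getD j false) = true := by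
        simp [pvKey, List.getD]
      rw [hstep, pvBFold_eq cs bf itf (j + 1) h parts (buf ++ [cs[j]]) (by simp)
        (bf.getD j false, itf.getD j false)]
      rw [hdc, List.takeWhile_cons, List.dropWhile_cons, if_pos hkey, if_pos hkey]
      simp [List.getD, List.getElem?_eq_getElem h]
    · -- style changes: flush and start a new run
      have hstep : pvBStep bf itf (parts, buf, some k) (j, cs[j]) =
          (parts ++ pvWrap k.1 k.2 buf, [cs[j]],
            some (bf.getD j false, itf.getD j false)) := by
        have hk2 : ¬ k = (bf[j]?.getD false, itf[j]?.getD false) := fun hh => hk hh.symm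
        simp [pvBStep, hbuf, List.isEmpty_iff, hk2]
      have hkey : pvKey k.1 k.2 (cs.getD j ' ', bf.getD j false, itf.getD j false) = false := by
        by_contra hcon
        rw [Bool.not_eq_false] at hcon
        simp only [pvKey, Bool.and_eq_true, beq_iff_eq] at hcon
        exact hk (Prod.ext hcon.1 hcon.2)
      rw [hstep, pvBFold_eq cs bf itf (j + 1) h (parts ++ pvWrap k.1 k.2 buf) [cs[j]] (by simp)
        (bf.getD j false, itf.getD j false)]
      rw [hdc, List.takeWhile_cons, List.dropWhile_cons,
        if_neg (by rw [hkey]; simp), if_neg (by rw [hkey]; simp), pvRender]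
      simp [List.getD, List.getElem?_eq_getElem h]
  · have hj' : j = cs.length := by omega
    subst hj'
    have h1 : ((List.range cs.length).zip cs).drop cs.length = [] :=
      List.drop_eq_nil_of_le (by simp)
    have h2 : (pvTriples cs bf itf).drop cs.length = [] :=
      List.drop_eq_nil_of_le (le_of_eq (pvTriples_length cs bf itf))
    rw [h1, h2]
    simp [pvBFinal, hbuf, pvRender]
termination_by cs.length - j

-- B total = canonical run rendering
theorem pvB_eq (cs : List Char) (bf itf : List Bool) :
    pvBFinal (((List.range cs.length).zip cs).foldl (pvBStep bf itf) ([], [], none)) =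
      pvRender (pvTriples cs bf itf) := by
  cases hcs : cs with
  | nil => simp [pvBFinal, pvTriples, pvRender]
  | cons c rest =>
    have h0 : 0 < cs.length := by rw [hcs]; simp
    rw [← hcs]
    have hcons : (List.range cs.length).zip cs =
        (0, cs[0]) :: ((List.range cs.length).zip cs).drop 1 := by
      have h2 := List.drop_eq_getElem_cons (l := (List.range cs.length).zip cs) (i := 0)
        (by simpa using h0)
      simpa using h2
    have hc : cs.getD 0 ' ' = cs[0] := List.getD_eq_getElem cs ' ' h0
    have hstep : pvBStep bf itf ([], [], none) (0, cs[0]) =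
        ([], [cs[0]], some (bf.getD 0 false, itf.getD 0 false)) := by
      simp [pvBStep]
    rw [hcons, List.foldl_cons, hstep,
      pvBFold_eq cs bf itf 1 (by omega) [] [cs[0]] (by simp) (bf.getD 0 false, itf.getD 0 false)]
    have hdc0 : pvTriples cs bf itf =
        (cs.getD 0 ' ', bf.getD 0 false, itf.getD 0 false) :: (pvTriples cs bf itf).drop 1 := by
      have h2 := pvTriples_drop_cons cs bf itf 0 h0
      simpa using h2
    conv_rhs => rw [hdc0]
    rw [pvRender]
    simp [List.getD, List.getElem?_eq_getElem h0]

-- ===== VERDICT (by name: the statement is the Claim_ definition above) =====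
theorem render_styled_segment_py_spec : Claim_equal_render_styled_segment_py := by
  intro text bf itf _hdom _hpre
  unfold Spec_render_styled_segment_py render_styled_segment_py render_styled_segment_py_alt
  simp only
  rw [pvB_eq]
  rw [show (pvALoop text.toList bf itf text.toList.length 0 []).flatten
        = pvRender (pvTriples text.toList bf itf) by
    rw [pvALoop_eq text.toList bf itf 0 (Nat.zero_le _) []]
    simp]
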